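-- pv_equiv track=rewrite | github.com/jodeen/advent-2018 | day10.py | build_field
-- ===== SOURCE A (Python) =====
-- def empty_field(max_x, max_y):
--     return [[' ' for x in range(max_x)] for y in range(max_y)]
--
-- def build_field(points):
--     min_x = min(points, key=lambda p: p["position"][0])["position"][0]
--     min_y = min(points, key=lambda p: p["position"][1])["position"][1]
--     max_x = max(points, key=lambda p: p["position"][0])["position"][0]
--     max_y = max(points, key=lambda p: p["position"][1])["position"][1]
--     print ((min_x, min_y))
--     print ((max_x, max_y))
--
--     field = empty_field(max_x - min_x + 1, max_y - min_y + 1)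
--
--     for point in points:
--         position = point["position"]
--         x = position[0] - min_x
--         y = position[1] - min_y
--         field[y][x] = '#'
--
--     return field
-- ===== SOURCE B (Python) =====
-- def build_field(points):
--     xs = [p["position"][0] for p in points]
--     ys = [p["position"][1] for p in points]
--     min_x, min_y = min(xs), min(ys)
--     max_x, max_y = max(xs), max(ys)
--     print((min_x, min_y))
--     print((max_x, max_y))
--
--     occupied = {(x - min_x, y - min_y) for x, y in zip(xs, ys)}
--     return [['#' if (x, y) in occupied else ' '
--              for x in range(max_x - min_x + 1)]
--             for y in range(max_y - min_y + 1)]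
-- ===== Notes on version B (the rewrite author's own statement) =====
-- stated objective: alternative
-- what changed: Instead of preallocating a blank grid and writing '#' into it per point, B builds a set of shifted point coordinates once and renders the grid with a nested comprehension that tests each cell for membership (cell-scan with set lookup vs point-scan with in-place writes); the two prints and the empty-input ValueError are kept.
import Mathlib
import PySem

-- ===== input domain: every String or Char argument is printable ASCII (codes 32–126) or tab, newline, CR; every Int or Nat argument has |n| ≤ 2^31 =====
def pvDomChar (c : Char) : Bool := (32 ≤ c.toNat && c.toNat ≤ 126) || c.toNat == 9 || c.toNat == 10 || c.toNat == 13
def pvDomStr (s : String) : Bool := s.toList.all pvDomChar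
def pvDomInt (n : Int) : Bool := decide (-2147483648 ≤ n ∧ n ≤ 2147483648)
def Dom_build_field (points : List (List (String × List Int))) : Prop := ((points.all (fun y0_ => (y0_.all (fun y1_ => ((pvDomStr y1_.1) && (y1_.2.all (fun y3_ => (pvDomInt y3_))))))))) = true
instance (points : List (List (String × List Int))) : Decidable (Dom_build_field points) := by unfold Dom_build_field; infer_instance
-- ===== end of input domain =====

-- B renders the grid by scanning every cell and testing membership in a set of shifted
-- coordinates, instead of A's preallocated blank grid written '#' per point; return value only
-- (both Pythons also print the two extrema pairs — stdout is identical and not modelled here).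


-- ===== PORT A =====
-- p["position"] : first-match lookup in the association list (Python dict)
def pvPos (p : List (String × List Int)) : List Int := (p.lookup "position").getD []
def empty_field (max_x max_y : Int) : List (List String) :=
  (PySem.List.pyRange 0 max_y 1).map (fun _ => (PySem.List.pyRange 0 max_x 1).map (fun _ => " "))

def build_field (points : List (List (String × List Int))) : List (List String) :=
  let min_x := ((PySem.List.min? points (fun p => PySem.List.pyGetD (pvPos p) 0 0)).map (fun p => PySem.List.pyGetD (pvPos p) 0 0)).getD 0
  let min_y := ((PySem.List.min? points (fun p => PySem.List.pyGetD (pvPos p) 1 0)).map (fun p => PySem.List.pyGetD (pvPos p) 1 0)).getD 0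
  let max_x := ((PySem.List.max? points (fun p => PySem.List.pyGetD (pvPos p) 0 0)).map (fun p => PySem.List.pyGetD (pvPos p) 0 0)).getD 0
  let max_y := ((PySem.List.max? points (fun p => PySem.List.pyGetD (pvPos p) 1 0)).map (fun p => PySem.List.pyGetD (pvPos p) 1 0)).getD 0
  let field := empty_field (max_x - min_x + 1) (max_y - min_y + 1)
  points.foldl (fun field point =>
    let position := pvPos point
    let x := PySem.List.pyGetD position 0 0 - min_x
    let y := PySem.List.pyGetD position 1 0 - min_y
    PySem.List.pySetD field y (PySem.List.pySetD (PySem.List.pyGetD field y []) x "#")) field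

-- ===== PORT B =====
def build_field_alt (points : List (List (String × List Int))) : List (List String) :=
  let xs := points.map (fun p => PySem.List.pyGetD (pvPos p) 0 0)
  let ys := points.map (fun p => PySem.List.pyGetD (pvPos p) 1 0)
  let min_x := (PySem.List.min? xs (fun v => v)).getD 0
  let min_y := (PySem.List.min? ys (fun v => v)).getD 0
  let max_x := (PySem.List.max? xs (fun v => v)).getD 0
  let max_y := (PySem.List.max? ys (fun v => v)).getD 0
  let occupied : PySem.Set (Int × Int) :=
    PySem.Set.ofList ((xs.zip ys).map (fun q => (q.1 - min_x, q.2 - min_y)))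
  (PySem.List.pyRange 0 (max_y - min_y + 1) 1).map (fun y =>
    (PySem.List.pyRange 0 (max_x - min_x + 1) 1).map (fun x =>
      if PySem.Set.contains occupied (x, y) then "#" else " "))

-- ===== PRECONDITION & SPEC =====
-- Pre_ excludes exactly the inputs where the Python A raises: the empty list (ValueError from
-- min) and points whose dict lacks a "position" of length ≥ 2 (KeyError / IndexError).
def Pre_build_field (points : List (List (String × List Int))) : Prop :=
  points ≠ [] ∧ (points.all (fun p => decide (2 ≤ ((p.lookup "position").getD []).length))) = true
instance (points : List (List (String × List Int))) : Decidable (Pre_build_field points) := by unfold Pre_build_field; infer_instance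

def pvWitness_build_field : (List (List (String × List Int))) := [[("position", [1, -1])], [("position", [0, 2])]]

def Spec_build_field (points : List (List (String × List Int))) (out : List (List String)) : Prop := out = build_field_alt points
instance (points : List (List (String × List Int))) (out : List (List String)) : Decidable (Spec_build_field points out) := by unfold Spec_build_field; infer_instance

-- ===== CLAIM (what is proved, stated in full; the proofs are below) =====
def Claim_equal_build_field : Prop := ∀ (points : List (List (String × List Int))), Dom_build_field points → Pre_build_field points → Spec_build_field points (build_field points)

-- ===== LEMMAS AND PROOFS =====

-- one cell of a grid, with the defaults never reached in range
def pvCell (g : List (List String)) (j i : Nat) : String := ((g[j]?.getD [])[i]?.getD " ")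

-- min over points with a key and min of the mapped values agree (ditto max)
theorem pv_min_map {α : Type} (xs : List α) (f : α → Int) (h : xs ≠ []) :
    ((PySem.List.min? xs f).map f).getD 0 = (PySem.List.min? (xs.map f) (fun v => v)).getD 0 := by
  have hne : PySem.List.min? xs f ≠ none := by
    simp [PySem.List.min?_eq_none_iff, h]
  have hne' : PySem.List.min? (xs.map f) (fun v => v) ≠ none := by
    simp [PySem.List.min?_eq_none_iff, h]
  obtain ⟨m, hm⟩ := Option.ne_none_iff_exists'.mp hne
  obtain ⟨m', hm'⟩ := Option.ne_none_iff_exists'.mp hne' 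
  rw [hm, hm']
  obtain ⟨q, hq, hfq⟩ := List.mem_map.mp (PySem.List.min?_mem hm')
  have h1 := PySem.List.min?_isMin hm q hq
  have h2 := PySem.List.min?_isMin hm' (f m) (List.mem_map_of_mem (PySem.List.min?_mem hm))
  simp only [Option.getD_some, Option.map_some]
  omega

theorem pv_max_map {α : Type} (xs : List α) (f : α → Int) (h : xs ≠ []) :
    ((PySem.List.max? xs f).map f).getD 0 = (PySem.List.max? (xs.map f) (fun v => v)).getD 0 := by
  have hne : PySem.List.max? xs f ≠ none := by
    simp [PySem.List.max?_eq_none_iff, h]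
  have hne' : PySem.List.max? (xs.map f) (fun v => v) ≠ none := by
    simp [PySem.List.max?_eq_none_iff, h]
  obtain ⟨m, hm⟩ := Option.ne_none_iff_exists'.mp hne
  obtain ⟨m', hm'⟩ := Option.ne_none_iff_exists'.mp hne' 
  rw [hm, hm']
  obtain ⟨q, hq, hfq⟩ := List.mem_map.mp (PySem.List.max?_mem hm')
  have h1 := PySem.List.max?_isMax hm q hq
  have h2 := PySem.List.max?_isMax hm' (f m) (List.mem_map_of_mem (PySem.List.max?_mem hm))
  simp only [Option.getD_some, Option.map_some]
  omega

-- the A-side point loop, abstracted over the shifted coordinates cx/cy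
def pvStep (cx cy : List (String × List Int) → Int)
    (g : List (List String)) (p : List (String × List Int)) : List (List String) :=
  PySem.List.pySetD g (cy p) (PySem.List.pySetD (PySem.List.pyGetD g (cy p) []) (cx p) "#")

theorem pvStep_shape (cx cy : List (String × List Int) → Int)
    (g : List (List String)) (p : List (String × List Int)) {W : Nat}
    (hrow : ∀ r ∈ g, r.length = W) (hcy : 0 ≤ cy p) (hcyH : (cy p).toNat < g.length) :
    (pvStep cx cy g p).length = g.length ∧ ∀ r ∈ pvStep cx cy g p, r.length = W := by
  unfold pvStep
  rw [PySem.List.pySetD_of_nonneg _ _ hcy]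
  refine ⟨List.length_set, ?_⟩
  intro r hr
  rcases List.mem_or_eq_of_mem_set hr with h' | h'
  · exact hrow r h'
  · subst h'
    rw [PySem.List.pyGetD_of_nonneg _ _ hcy, PySem.List.length_pySetD,
      List.getD_eq_getElem g [] hcyH]
    exact hrow _ (List.getElem_mem hcyH)

theorem pvStep_cell (cx cy : List (String × List Int) → Int)
    (g : List (List String)) (p : List (String × List Int)) {W : Nat}
    (hrow : ∀ r ∈ g, r.length = W)
    (hcx : 0 ≤ cx p) (hcxW : (cx p).toNat < W) (hcy : 0 ≤ cy p) (hcyH : (cy p).toNat < g.length)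
    (j i : Nat) (_hj : j < g.length) (_hi : i < W) :
    pvCell (pvStep cx cy g p) j i =
      if cx p = (i : Int) ∧ cy p = (j : Int) then "#" else pvCell g j i := by
  have hWrow : (g.getD (cy p).toNat []).length = W :=
    (List.getD_eq_getElem g [] hcyH) ▸ hrow _ (List.getElem_mem hcyH)
  unfold pvStep pvCell
  rw [PySem.List.pySetD_of_nonneg _ _ hcy, PySem.List.pySetD_of_nonneg _ _ hcx,
    PySem.List.pyGetD_of_nonneg _ _ hcy, List.getElem?_set]
  by_cases hyj : (cy p).toNat = j
  · rw [if_pos hyj, if_pos (hyj ▸ hcyH), Option.getD_some, List.getElem?_set]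
    by_cases hxi : (cx p).toNat = i
    · have hc : cx p = (i : Int) ∧ cy p = (j : Int) := by omega
      rw [if_pos hxi, hWrow, if_pos hcxW, if_pos hc, Option.getD_some]
    · have hc : ¬ (cx p = (i : Int) ∧ cy p = (j : Int)) := by omega
      rw [if_neg hxi, if_neg hc, List.getD_eq_getElem?_getD, hyj]
  · have hc : ¬ (cx p = (i : Int) ∧ cy p = (j : Int)) := by omega
    rw [if_neg hyj, if_neg hc]

theorem pvFold_cell (cx cy : List (String × List Int) → Int)
    (pts : List (List (String × List Int))) {W : Nat} :
    ∀ (g : List (List String)),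
    (∀ r ∈ g, r.length = W) →
    (∀ p ∈ pts, 0 ≤ cx p ∧ (cx p).toNat < W ∧ 0 ≤ cy p ∧ (cy p).toNat < g.length) →
    ((pts.foldl (pvStep cx cy) g).length = g.length ∧
      (∀ r ∈ pts.foldl (pvStep cx cy) g, r.length = W)) ∧
    ∀ (j i : Nat), j < g.length → i < W →
      pvCell (pts.foldl (pvStep cx cy) g) j i =
        if ∃ p ∈ pts, cx p = (i : Int) ∧ cy p = (j : Int) then "#" else pvCell g j i := by
  induction pts with
  | nil => intro g hrow _; exact ⟨⟨rfl, hrow⟩, fun j i _ _ => by simp⟩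
  | cons p rest ih =>
    intro g hrow hpts
    have hp := hpts p (List.mem_cons_self ..)
    obtain ⟨hsl, hsr⟩ := pvStep_shape cx cy g p hrow hp.2.2.1 hp.2.2.2
    have ih' := ih (pvStep cx cy g p) hsr (fun q hq => by
      have := hpts q (List.mem_cons_of_mem _ hq); omega)
    refine ⟨⟨by simpa [hsl] using ih'.1.1, by simpa using ih'.1.2⟩, ?_⟩
    intro j i hj hi
    rw [List.foldl_cons, ih'.2 j i (by omega) hi,
      pvStep_cell cx cy g p hrow hp.1 hp.2.1 hp.2.2.1 hp.2.2.2 j i hj hi]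
    simp only [List.exists_mem_cons_iff]
    by_cases hR : ∃ q ∈ rest, cx q = (i : Int) ∧ cy q = (j : Int)
    · rw [if_pos hR, if_pos (Or.inr hR)]
    · rw [if_neg hR]
      by_cases hP : cx p = (i : Int) ∧ cy p = (j : Int)
      · rw [if_pos hP, if_pos (Or.inl hP)]
      · rw [if_neg hP, if_neg (by rintro (h | h); exacts [hP h, hR h])]

theorem pv_empty_length (W H : Int) : (empty_field W H).length = H.toNat := by
  simp [empty_field, PySem.List.length_pyRange_one]

theorem pv_empty_rows (W H : Int) : ∀ r ∈ empty_field W H, r.length = W.toNat := by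
  intro r hr
  obtain ⟨y, hy, rfl⟩ := List.mem_map.mp hr
  simp [PySem.List.length_pyRange_one]

theorem pv_empty_cell (W H : Int) (j i : Nat) : pvCell (empty_field W H) j i = " " := by
  unfold pvCell empty_field
  rw [List.getElem?_map]
  cases h : (PySem.List.pyRange 0 H 1)[j]? with
  | none => simp
  | some y =>
    simp only [Option.map_some, Option.getD_some, List.getElem?_map]
    cases h2 : (PySem.List.pyRange 0 W 1)[i]? <;> simp

theorem pv_alt_cell (occ : PySem.Set (Int × Int)) (W H : Int) (j i : Nat)
    (hj : j < H.toNat) (hi : i < W.toNat) :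
    pvCell ((PySem.List.pyRange 0 H 1).map (fun y =>
      (PySem.List.pyRange 0 W 1).map (fun x =>
        if PySem.Set.contains occ (x, y) then "#" else " "))) j i =
    (if PySem.Set.contains occ ((i : Int), (j : Int)) then "#" else " ") := by
  unfold pvCell
  rw [List.getElem?_map, PySem.List.getElem?_pyRange_one, if_pos (by omega)]
  simp only [Option.map_some, Option.getD_some, List.getElem?_map]
  rw [PySem.List.getElem?_pyRange_one, if_pos (by omega)]
  simp

theorem pv_alt_row_len (occ : PySem.Set (Int × Int)) (W H : Int) (j : Nat) (hj : j < H.toNat) :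
    ((((PySem.List.pyRange 0 H 1).map (fun y =>
      (PySem.List.pyRange 0 W 1).map (fun x =>
        if PySem.Set.contains occ (x, y) then "#" else " ")))[j]?).getD []).length = W.toNat := by
  rw [List.getElem?_map, PySem.List.getElem?_pyRange_one, if_pos (by omega)]
  simp [PySem.List.length_pyRange_one]

theorem pv_grid_ext (g1 g2 : List (List String)) (hlen : g1.length = g2.length)
    (hrows : ∀ j : Nat, j < g1.length → (g1[j]?.getD []).length = (g2[j]?.getD []).length)
    (hcell : ∀ j i : Nat, j < g1.length → i < (g1[j]?.getD []).length →
      pvCell g1 j i = pvCell g2 j i) :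
    g1 = g2 := by
  apply List.ext_getElem?
  intro j
  by_cases hj : j < g1.length
  · have h1 : g1[j]? = some g1[j] := List.getElem?_eq_getElem hj
    have h2 : g2[j]? = some g2[j] := List.getElem?_eq_getElem (hlen ▸ hj)
    rw [h1, h2]
    have hrl := hrows j hj
    rw [h1, h2] at hrl
    simp only [Option.getD_some] at hrl
    congr 1
    apply List.ext_getElem?
    intro i
    by_cases hi : i < g1[j].length
    · have c := hcell j i hj (by rw [h1]; simpa using hi)
      unfold pvCell at c
      rw [h1, h2] at c
      simp only [Option.getD_some] at c
      have hi2 : i < g2[j].length := by omega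
      rw [List.getElem?_eq_getElem hi, List.getElem?_eq_getElem hi2] at c ⊢
      simp only [Option.getD_some] at c
      rw [c]
    · rw [List.getElem?_eq_none (by omega), List.getElem?_eq_none (by omega)]
  · rw [List.getElem?_eq_none (by omega), List.getElem?_eq_none (by omega)]

theorem pvA_eq (points : List (List (String × List Int))) (mx my Mx My : Int) :
    points.foldl (fun field point =>
      PySem.List.pySetD field (PySem.List.pyGetD (pvPos point) 1 0 - my)
        (PySem.List.pySetD
          (PySem.List.pyGetD field (PySem.List.pyGetD (pvPos point) 1 0 - my) [])
          (PySem.List.pyGetD (pvPos point) 0 0 - mx) "#"))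
      (empty_field (Mx - mx + 1) (My - my + 1)) =
    List.foldl (pvStep (fun p => PySem.List.pyGetD (pvPos p) 0 0 - mx)
      (fun p => PySem.List.pyGetD (pvPos p) 1 0 - my))
      (empty_field (Mx - mx + 1) (My - my + 1)) points := rfl

theorem pv_main (points : List (List (String × List Int))) (mx my Mx My : Int)
    (hbx : ∀ p ∈ points, mx ≤ PySem.List.pyGetD (pvPos p) 0 0)
    (hby : ∀ p ∈ points, my ≤ PySem.List.pyGetD (pvPos p) 1 0)
    (hBx : ∀ p ∈ points, PySem.List.pyGetD (pvPos p) 0 0 ≤ Mx)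
    (hBy : ∀ p ∈ points, PySem.List.pyGetD (pvPos p) 1 0 ≤ My) :
    points.foldl (fun field point =>
      PySem.List.pySetD field (PySem.List.pyGetD (pvPos point) 1 0 - my)
        (PySem.List.pySetD
          (PySem.List.pyGetD field (PySem.List.pyGetD (pvPos point) 1 0 - my) [])
          (PySem.List.pyGetD (pvPos point) 0 0 - mx) "#"))
      (empty_field (Mx - mx + 1) (My - my + 1)) =
    (PySem.List.pyRange 0 (My - my + 1) 1).map (fun y =>
      (PySem.List.pyRange 0 (Mx - mx + 1) 1).map (fun x =>
        if PySem.Set.contains (PySem.Set.ofList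
          (List.map (fun q => (q.1 - mx, q.2 - my))
            ((points.map (fun p => PySem.List.pyGetD (pvPos p) 0 0)).zip
              (points.map (fun p => PySem.List.pyGetD (pvPos p) 1 0))))) (x, y)
        then "#" else " ")) := by
  rw [pvA_eq points mx my Mx My]
  have hEl : (empty_field (Mx - mx + 1) (My - my + 1)).length = (My - my + 1).toNat :=
    pv_empty_length _ _
  have hA := pvFold_cell (fun p => PySem.List.pyGetD (pvPos p) 0 0 - mx)
    (fun p => PySem.List.pyGetD (pvPos p) 1 0 - my) points
    (empty_field (Mx - mx + 1) (My - my + 1))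
    (pv_empty_rows _ _)
    (fun p hp => by
      have h1 := hbx p hp; have h2 := hBx p hp; have h3 := hby p hp; have h4 := hBy p hp
      dsimp only
      rw [hEl]
      exact ⟨by omega, by omega, by omega, by omega⟩)
  have hmem : ∀ (a b : Int),
      (PySem.Set.contains (PySem.Set.ofList
        (List.map (fun q => (q.1 - mx, q.2 - my))
          ((points.map (fun p => PySem.List.pyGetD (pvPos p) 0 0)).zip
            (points.map (fun p => PySem.List.pyGetD (pvPos p) 1 0))))) (a, b)) = true ↔
      ∃ p ∈ points, PySem.List.pyGetD (pvPos p) 0 0 - mx = a ∧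
        PySem.List.pyGetD (pvPos p) 1 0 - my = b := by
    intro a b
    rw [PySem.Set.contains_iff, PySem.Set.mem_ofList, List.zip_map', List.map_map]
    simp [List.mem_map, Prod.ext_iff, eq_comm]
  refine pv_grid_ext _ _ ?_ ?_ ?_
  · rw [hA.1.1, hEl]
    simp [PySem.List.length_pyRange_one]
  · intro j hj
    have hjH : j < (My - my + 1).toNat := by rw [hA.1.1, hEl] at hj; exact hj
    rw [List.getElem?_eq_getElem hj]
    simp only [Option.getD_some]
    rw [hA.1.2 _ (List.getElem_mem hj), pv_alt_row_len _ _ _ j hjH]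
  · intro j i hj hi
    have hjH : j < (My - my + 1).toNat := by rw [hA.1.1, hEl] at hj; exact hj
    have hiW : i < (Mx - mx + 1).toNat := by
      rw [List.getElem?_eq_getElem hj] at hi
      simp only [Option.getD_some] at hi
      rw [hA.1.2 _ (List.getElem_mem hj)] at hi
      exact hi
    rw [hA.2 j i (by rw [hEl]; exact hjH) hiW, pv_empty_cell,
      pv_alt_cell _ _ _ j i hjH hiW]
    dsimp only
    by_cases h : ∃ p ∈ points, PySem.List.pyGetD (pvPos p) 0 0 - mx = (i : Int) ∧
        PySem.List.pyGetD (pvPos p) 1 0 - my = (j : Int)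
    · rw [if_pos h, if_pos ((hmem _ _).mpr h)]
    · rw [if_neg h, if_neg (fun hc => h ((hmem _ _).mp hc))]


-- ===== VERDICT (by name: the statement is the Claim_ definition above) =====
theorem build_field_spec : Claim_equal_build_field := by
  intro points _ hpre
  obtain ⟨hne, hall⟩ := hpre
  unfold Spec_build_field build_field build_field_alt
  dsimp only
  rw [← pv_min_map points (fun p => PySem.List.pyGetD (pvPos p) 0 0) hne,
      ← pv_min_map points (fun p => PySem.List.pyGetD (pvPos p) 1 0) hne,
      ← pv_max_map points (fun p => PySem.List.pyGetD (pvPos p) 0 0) hne,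
      ← pv_max_map points (fun p => PySem.List.pyGetD (pvPos p) 1 0) hne]
  obtain ⟨m0, hm0⟩ := Option.ne_none_iff_exists'.mp (show PySem.List.min? points
    (fun p => PySem.List.pyGetD (pvPos p) 0 0) ≠ none by simp [PySem.List.min?_eq_none_iff, hne])
  obtain ⟨m1, hm1⟩ := Option.ne_none_iff_exists'.mp (show PySem.List.min? points
    (fun p => PySem.List.pyGetD (pvPos p) 1 0) ≠ none by simp [PySem.List.min?_eq_none_iff, hne])
  obtain ⟨M0, hM0⟩ := Option.ne_none_iff_exists'.mp (show PySem.List.max? points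
    (fun p => PySem.List.pyGetD (pvPos p) 0 0) ≠ none by simp [PySem.List.max?_eq_none_iff, hne])
  obtain ⟨M1, hM1⟩ := Option.ne_none_iff_exists'.mp (show PySem.List.max? points
    (fun p => PySem.List.pyGetD (pvPos p) 1 0) ≠ none by simp [PySem.List.max?_eq_none_iff, hne])
  rw [hm0, hm1, hM0, hM1]
  dsimp only [Option.map_some, Option.getD_some]
  exact pv_main points _ _ _ _ (PySem.List.min?_isMin hm0) (PySem.List.min?_isMin hm1)
    (PySem.List.max?_isMax hM0) (PySem.List.max?_isMax hM1)
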